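-- pv_equiv track=rewrite | github.com/lucascppessoa/FloridaAed202502 | main.py | _build_shift_skill_demands
-- ===== SOURCE A (Python) =====
-- from typing import Dict, List, Tuple, Optional, Any
--
-- SKILLS = ["MD", "N", "NA", "D"]
--
-- TEAM_REQUIREMENTS: Dict[str, Dict[str, int]] = {
--     "ADV": {"MD": 1, "N": 1, "D": 1},
--     "BAS": {"NA": 1, "D": 1},
--     "MOTO": {"N": 1, "NA": 1},
-- }
--
-- def _is_weekend_day(shift_index: int) -> bool:
--     dow = (shift_index // 3) % 7
--     return dow in (5, 6)
--
-- def _is_night_shift(shift_index: int) -> bool: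
--     return shift_index % 3 == 2
--
-- def _build_shift_skill_demands(
--     days: int,
--     teams_per_day_shift: Dict[str, int],
--     teams_per_night_shift: Dict[str, int],
-- ) -> List[Dict[str, int]]:
--     """Build per-shift skill demands:
--         No MOTO on nights and weekends
--     """
--     shifts = days * 3
--     demand_by_shift: List[Dict[str, int]] = []
--     for shift_index in range(shifts):
--         # Construct team supply for this shift
--         if _is_night_shift(shift_index) or _is_weekend_day(shift_index):
--             team_supply = teams_per_night_shift
--         else:
--             team_supply = teams_per_day_shift
--
--         # Convert team supply to skill demand
--         demand = {skill: 0 for skill in SKILLS}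
--         for team, count in team_supply.items():
--             if count <= 0 or team not in TEAM_REQUIREMENTS:
--                 continue
--             for skill, req in TEAM_REQUIREMENTS[team].items():
--                 demand[skill] += count * req
--         demand_by_shift.append(demand)
--     return demand_by_shift
-- ===== SOURCE B (Python) =====
-- from typing import Dict, List
--
-- SKILLS = ["MD", "N", "NA", "D"]
--
-- TEAM_REQUIREMENTS: Dict[str, Dict[str, int]] = {
--     "ADV": {"MD": 1, "N": 1, "D": 1},
--     "BAS": {"NA": 1, "D": 1},
--     "MOTO": {"N": 1, "NA": 1},
-- }
--
-- def _skill_demand(team_supply: Dict[str, int]) -> Dict[str, int]: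
--     """Per-skill totals: one sum over the supply for each skill."""
--     return {
--         skill: sum(
--             count * TEAM_REQUIREMENTS[team].get(skill, 0)
--             for team, count in team_supply.items()
--             if count > 0 and team in TEAM_REQUIREMENTS
--         )
--         for skill in SKILLS
--     }
--
-- def _build_shift_skill_demands(
--     days: int,
--     teams_per_day_shift: Dict[str, int],
--     teams_per_night_shift: Dict[str, int],
-- ) -> List[Dict[str, int]]:
--     day_demand = _skill_demand(teams_per_day_shift)
--     night_demand = _skill_demand(teams_per_night_shift)
--     return [
--         dict(night_demand)
--         if shift % 3 == 2 or (shift // 3) % 7 in (5, 6)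
--         else dict(day_demand)
--         for shift in range(days * 3)
--     ]
-- ===== Notes on version B (the rewrite author's own statement) =====
-- stated objective: faster
-- what changed: B computes the skill-demand dict once per supply (day and night) before the loop, using a per-skill summation over the supply instead of per-team dict mutation, and then just copies the right precomputed dict for each of the days*3 shifts, instead of A's recomputation of the demand dict inside every shift iteration.
import Mathlib
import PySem

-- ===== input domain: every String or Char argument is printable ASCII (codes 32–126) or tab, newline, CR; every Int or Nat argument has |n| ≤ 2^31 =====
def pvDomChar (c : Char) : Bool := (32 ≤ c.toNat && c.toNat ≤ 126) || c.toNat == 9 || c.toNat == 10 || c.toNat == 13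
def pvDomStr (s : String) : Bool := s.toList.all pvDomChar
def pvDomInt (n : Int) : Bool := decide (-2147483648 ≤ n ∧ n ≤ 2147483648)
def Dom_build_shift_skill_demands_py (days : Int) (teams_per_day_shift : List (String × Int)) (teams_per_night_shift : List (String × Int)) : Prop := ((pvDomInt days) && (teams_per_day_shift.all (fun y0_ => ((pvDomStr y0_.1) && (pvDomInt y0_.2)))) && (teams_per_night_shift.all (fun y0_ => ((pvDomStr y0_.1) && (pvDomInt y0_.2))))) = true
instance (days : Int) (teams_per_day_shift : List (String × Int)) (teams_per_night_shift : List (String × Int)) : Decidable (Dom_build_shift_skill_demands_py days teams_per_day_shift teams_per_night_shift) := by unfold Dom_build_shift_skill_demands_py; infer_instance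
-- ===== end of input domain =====

-- B hoists the skill-demand computation out of the per-shift loop (done once per supply, by
-- per-skill summation) and copies the precomputed dict per shift; return-value equivalence only.

-- ===== PORT A =====
-- SKILLS = ["MD", "N", "NA", "D"]
def pySKILLS : List String := ["MD", "N", "NA", "D"]

-- TEAM_REQUIREMENTS (dict of dicts, insertion order)
def pyTEAM_REQUIREMENTS : PySem.Dict String (PySem.Dict String Int) :=
  PySem.Dict.mk
    [ ("ADV", PySem.Dict.mk [("MD", 1), ("N", 1), ("D", 1)])
    , ("BAS", PySem.Dict.mk [("NA", 1), ("D", 1)])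
    , ("MOTO", PySem.Dict.mk [("N", 1), ("NA", 1)]) ]

def is_weekend_day_py (shift_index : Int) : Bool :=
  let dow := PySem.Int.mod (PySem.Int.floordiv shift_index 3) 7
  dow == 5 || dow == 6

def is_night_shift_py (shift_index : Int) : Bool :=
  PySem.Int.mod shift_index 3 == 2

-- inner loops of A: demand = {skill: 0 …}; for team, count in supply.items(): …
-- (demand[skill] += count*req is exact here via modify: every skill of TEAM_REQUIREMENTS
--  is already a key of demand, so Python's d[k] = d[k] + v coincides with modify k 0 (·+v))
def pyDemandA (team_supply : PySem.Dict String Int) : PySem.Dict String Int :=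
  let demand := pySKILLS.foldl (fun d skill => d.insert skill 0) PySem.Dict.empty
  team_supply.items.foldl
    (fun demand tc =>
      if tc.2 ≤ 0 || !(pyTEAM_REQUIREMENTS.contains tc.1) then demand
      else ((pyTEAM_REQUIREMENTS.get? tc.1).getD PySem.Dict.empty).items.foldl
             (fun demand sr => demand.modify sr.1 0 (· + tc.2 * sr.2)) demand)
    demand

def build_shift_skill_demands_py (days : Int) (teams_per_day_shift : List (String × Int)) (teams_per_night_shift : List (String × Int)) : List (List (String × Int)) :=
  let shifts := days * 3
  (PySem.List.pyRange 0 shifts 1).foldl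
    (fun demand_by_shift shift_index =>
      let team_supply :=
        if is_night_shift_py shift_index || is_weekend_day_py shift_index then
          PySem.Dict.ofList teams_per_night_shift
        else
          PySem.Dict.ofList teams_per_day_shift
      demand_by_shift ++ [(pyDemandA team_supply).items])
    []

-- ===== PORT B =====
-- Source B's _skill_demand: {skill: sum(count * TEAM_REQUIREMENTS[team].get(skill, 0)
--                                   for team, count in supply.items()
--                                   if count > 0 and team in TEAM_REQUIREMENTS) for skill in SKILLS}
def altSkillDemand (team_supply : PySem.Dict String Int) : List (String × Int) :=
  pySKILLS.map (fun skill =>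
    (skill,
     ((team_supply.items.filter
         (fun tc => decide (0 < tc.2) && pyTEAM_REQUIREMENTS.contains tc.1)).map
        (fun tc => tc.2 * ((pyTEAM_REQUIREMENTS.get? tc.1).getD PySem.Dict.empty).getD skill 0)).sum))

def build_shift_skill_demands_py_alt (days : Int) (teams_per_day_shift : List (String × Int)) (teams_per_night_shift : List (String × Int)) : List (List (String × Int)) :=
  let day_demand := altSkillDemand (PySem.Dict.ofList teams_per_day_shift)
  let night_demand := altSkillDemand (PySem.Dict.ofList teams_per_night_shift)
  (PySem.List.pyRange 0 (days * 3) 1).map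
    (fun shift =>
      if PySem.Int.mod shift 3 == 2
         || (let dow := PySem.Int.mod (PySem.Int.floordiv shift 3) 7; dow == 5 || dow == 6) then
        night_demand
      else
        day_demand)

-- ===== PRECONDITION & SPEC =====
def Spec_build_shift_skill_demands_py (days : Int) (teams_per_day_shift : List (String × Int)) (teams_per_night_shift : List (String × Int)) (out : List (List (String × Int))) : Prop := out = build_shift_skill_demands_py_alt days teams_per_day_shift teams_per_night_shift
instance (days : Int) (teams_per_day_shift : List (String × Int)) (teams_per_night_shift : List (String × Int)) (out : List (List (String × Int))) : Decidable (Spec_build_shift_skill_demands_py days teams_per_day_shift teams_per_night_shift out) := by unfold Spec_build_shift_skill_demands_py; infer_instance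

-- ===== CLAIM (what is proved, stated in full; the proofs are below) =====
def Claim_equal_build_shift_skill_demands_py : Prop := ∀ (days : Int) (teams_per_day_shift : List (String × Int)) (teams_per_night_shift : List (String × Int)), Dom_build_shift_skill_demands_py days teams_per_day_shift teams_per_night_shift → Spec_build_shift_skill_demands_py days teams_per_day_shift teams_per_night_shift (build_shift_skill_demands_py days teams_per_day_shift teams_per_night_shift)

-- ===== LEMMAS AND PROOFS =====

-- B's per-skill summand over an item list, per skill
def bSum (skill : String) (l : List (String × Int)) : Int :=
  ((l.filter (fun tc => decide (0 < tc.2) && pyTEAM_REQUIREMENTS.contains tc.1)).map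
     (fun tc => tc.2 * ((pyTEAM_REQUIREMENTS.get? tc.1).getD PySem.Dict.empty).getD skill 0)).sum

-- the core invariant: A's team loop, run from any dict with exactly the SKILLS keys,
-- adds exactly B's per-skill sums
theorem pyDemandA_loop (l : List (String × Int)) :
    ∀ m n na dd : Int,
    (l.foldl
      (fun demand tc =>
        if tc.2 ≤ 0 || !(pyTEAM_REQUIREMENTS.contains tc.1) then demand
        else ((pyTEAM_REQUIREMENTS.get? tc.1).getD PySem.Dict.empty).items.foldl
               (fun demand sr => demand.modify sr.1 0 (· + tc.2 * sr.2)) demand)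
      (PySem.Dict.mk [("MD", m), ("N", n), ("NA", na), ("D", dd)])).items
    = [("MD", m + bSum "MD" l), ("N", n + bSum "N" l),
       ("NA", na + bSum "NA" l), ("D", dd + bSum "D" l)] := by
  induction l with
  | nil => intro m n na dd; simp [bSum]
  | cons p l ih =>
    intro m n na dd
    obtain ⟨t, c⟩ := p
    by_cases hc : c ≤ 0
    · have hskip : bSum "MD" ((t, c) :: l) = bSum "MD" l ∧ bSum "N" ((t, c) :: l) = bSum "N" l ∧
          bSum "NA" ((t, c) :: l) = bSum "NA" l ∧ bSum "D" ((t, c) :: l) = bSum "D" l := by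
        refine ⟨?_, ?_, ?_, ?_⟩ <;> simp [bSum, show ¬(0 < c) by omega]
      simp only [List.foldl_cons, hc, decide_true, Bool.true_or, if_true, ih,
        hskip.1, hskip.2.1, hskip.2.2.1, hskip.2.2.2]
    · by_cases hcont : pyTEAM_REQUIREMENTS.contains t = true
      · have ht : t = "ADV" ∨ t = "BAS" ∨ t = "MOTO" := by
          simp [pyTEAM_REQUIREMENTS, PySem.Dict.contains] at hcont
          rcases hcont with h | h | h <;> simp_all
        have hsum : ∀ s : String, bSum s ((t, c) :: l)
            = c * ((pyTEAM_REQUIREMENTS.get? t).getD PySem.Dict.empty).getD s 0 + bSum s l := by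
          intro s
          simp [bSum, show (0 < c) by omega, hcont]
        rcases ht with ht | ht | ht
        · subst ht
          have hstep : ((pyTEAM_REQUIREMENTS.get? "ADV").getD PySem.Dict.empty).items.foldl
                (fun demand sr => demand.modify sr.1 0 (· + c * sr.2))
                (PySem.Dict.mk [("MD", m), ("N", n), ("NA", na), ("D", dd)])
              = PySem.Dict.mk [("MD", m + c * 1), ("N", n + c * 1), ("NA", na), ("D", dd + c * 1)] := by
            simp [pyTEAM_REQUIREMENTS, PySem.Dict.get?, PySem.Dict.modify, PySem.Dict.getD,
              PySem.Dict.insert, PySem.Dict.contains]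
          simp only [List.foldl_cons, show (decide (c ≤ 0) = false) by simp; omega,
            hcont, Bool.not_true, Bool.or_false, Bool.false_eq_true, if_false]
          rw [hstep, ih]
          simp only [hsum]
          simp [pyTEAM_REQUIREMENTS, PySem.Dict.getD, PySem.Dict.get?, PySem.Dict.empty]
          omega
        · subst ht
          have hstep : ((pyTEAM_REQUIREMENTS.get? "BAS").getD PySem.Dict.empty).items.foldl
                (fun demand sr => demand.modify sr.1 0 (· + c * sr.2))
                (PySem.Dict.mk [("MD", m), ("N", n), ("NA", na), ("D", dd)])
              = PySem.Dict.mk [("MD", m), ("N", n), ("NA", na + c * 1), ("D", dd + c * 1)] := by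
            simp [pyTEAM_REQUIREMENTS, PySem.Dict.get?, PySem.Dict.modify, PySem.Dict.getD,
              PySem.Dict.insert, PySem.Dict.contains]
          simp only [List.foldl_cons, show (decide (c ≤ 0) = false) by simp; omega,
            hcont, Bool.not_true, Bool.or_false, Bool.false_eq_true, if_false]
          rw [hstep, ih]
          simp only [hsum]
          simp [pyTEAM_REQUIREMENTS, PySem.Dict.getD, PySem.Dict.get?, PySem.Dict.empty]
          omega
        · subst ht
          have hstep : ((pyTEAM_REQUIREMENTS.get? "MOTO").getD PySem.Dict.empty).items.foldl
                (fun demand sr => demand.modify sr.1 0 (· + c * sr.2))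
                (PySem.Dict.mk [("MD", m), ("N", n), ("NA", na), ("D", dd)])
              = PySem.Dict.mk [("MD", m), ("N", n + c * 1), ("NA", na + c * 1), ("D", dd)] := by
            simp [pyTEAM_REQUIREMENTS, PySem.Dict.get?, PySem.Dict.modify, PySem.Dict.getD,
              PySem.Dict.insert, PySem.Dict.contains]
          simp only [List.foldl_cons, show (decide (c ≤ 0) = false) by simp; omega,
            hcont, Bool.not_true, Bool.or_false, Bool.false_eq_true, if_false]
          rw [hstep, ih]
          simp only [hsum]
          simp [pyTEAM_REQUIREMENTS, PySem.Dict.getD, PySem.Dict.get?, PySem.Dict.empty]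
          omega
      · have hskip : ∀ s : String, bSum s ((t, c) :: l) = bSum s l := by
          intro s; simp [bSum, hcont]
        simp only [List.foldl_cons, hcont, Bool.not_false, Bool.or_true, if_true, ih,
          hskip]

theorem pyDemandA_eq (d : PySem.Dict String Int) :
    (pyDemandA d).items = altSkillDemand d := by
  have hinit : pySKILLS.foldl (fun d skill => d.insert skill 0) PySem.Dict.empty
      = PySem.Dict.mk [("MD", (0:Int)), ("N", 0), ("NA", 0), ("D", 0)] := rfl
  unfold pyDemandA altSkillDemand
  rw [hinit, pyDemandA_loop]
  simp [pySKILLS, bSum]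

-- ===== VERDICT (by name: the statement is the Claim_ definition above) =====
theorem build_shift_skill_demands_py_spec : Claim_equal_build_shift_skill_demands_py := by
  intro days day night _
  unfold Spec_build_shift_skill_demands_py build_shift_skill_demands_py build_shift_skill_demands_py_alt
  rw [PySem.List.foldl_append_singleton_eq_map]
  refine List.map_congr_left (fun i _ => ?_)
  simp only [is_night_shift_py, is_weekend_day_py]
  split <;> exact pyDemandA_eq _
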